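-- pv_equiv track=rewrite | github.com/Loen10/python-number-to-english | main.py | find_last_non_zero_digit
-- ===== SOURCE A (Python) =====
-- def find_last_non_zero_digit(digits):
--     last_non_zero = 0
--
--     for i, c in enumerate(digits):
--         if not c.isdigit():
--             break
--
--         if c != "0":
--             last_non_zero = i
--
--     return last_non_zero
-- ===== SOURCE B (Python) =====
-- def find_last_non_zero_digit(digits):
--     # Find the boundary of the leading digit prefix, then scan it backwards
--     # for the first non-zero digit; 0 if none.
--     end = 0
--     for c in digits:
--         if not c.isdigit():
--             break
--         end += 1
--     for i in range(end - 1, -1, -1):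
--         if digits[i] != "0":
--             return i
--     return 0
-- ===== Notes on version B (the rewrite author's own statement) =====
-- stated objective: alternative
-- what changed: B first finds the digit-prefix boundary, then scans that prefix backwards and returns the first non-zero index found, instead of A's single forward pass carrying a last-seen accumulator.
import Mathlib
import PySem

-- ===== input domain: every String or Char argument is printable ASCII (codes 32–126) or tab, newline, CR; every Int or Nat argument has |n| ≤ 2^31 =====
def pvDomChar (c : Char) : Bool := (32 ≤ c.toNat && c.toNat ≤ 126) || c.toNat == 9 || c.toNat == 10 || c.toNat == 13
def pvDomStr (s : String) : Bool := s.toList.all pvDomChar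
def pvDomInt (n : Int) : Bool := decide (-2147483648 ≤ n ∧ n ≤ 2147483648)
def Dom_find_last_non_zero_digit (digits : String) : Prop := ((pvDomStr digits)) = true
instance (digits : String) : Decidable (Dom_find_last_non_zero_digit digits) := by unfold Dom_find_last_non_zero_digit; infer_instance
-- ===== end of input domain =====

-- B finds the digit-prefix boundary first, then scans that prefix backwards for the
-- first non-zero digit (0 if none) — a different decomposition of A's forward scan.

-- ===== PORT A =====
-- forward loop: stop at first non-digit, remember last index of a non-'0' digit
def pvGoA (l : List Char) (i : Int) (acc : Int) : Int :=
  match l with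
  | [] => acc
  | c :: rest =>
    if ¬ PySem.Chars.isdigit c then acc
    else pvGoA rest (i + 1) (if c ≠ '0' then i else acc)

def find_last_non_zero_digit (digits : String) : Int :=
  pvGoA digits.toList 0 0

-- ===== PORT B =====
-- first loop of Source B: length of the leading digit prefix
def pvBoundary (l : List Char) : Nat :=
  match l with
  | [] => 0
  | c :: rest => if PySem.Chars.isdigit c then pvBoundary rest + 1 else 0

-- second loop of Source B: for i in range(k-1, -1, -1): if digits[i] != '0': return i
-- (indices checked are always < l.length, so getD is exact here)
def pvBack (l : List Char) : Nat → Int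
  | 0 => 0
  | k + 1 => if l.getD k ' ' ≠ '0' then (k : Int) else pvBack l k

def find_last_non_zero_digit_alt (digits : String) : Int :=
  pvBack digits.toList (pvBoundary digits.toList)

-- ===== PRECONDITION & SPEC =====
def Spec_find_last_non_zero_digit (digits : String) (out : Int) : Prop := out = find_last_non_zero_digit_alt digits
instance (digits : String) (out : Int) : Decidable (Spec_find_last_non_zero_digit digits out) := by unfold Spec_find_last_non_zero_digit; infer_instance

-- ===== CLAIM (what is proved, stated in full; the proofs are below) =====
def Claim_equal_find_last_non_zero_digit : Prop := ∀ (digits : String), Dom_find_last_non_zero_digit digits → Spec_find_last_non_zero_digit digits (find_last_non_zero_digit digits)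

-- ===== LEMMAS AND PROOFS =====

-- index of the last non-'0' character of a list, if any
def pvLastNZ : List Char → Option Nat
  | [] => none
  | c :: rest =>
    match pvLastNZ rest with
    | some j => some (j + 1)
    | none => if c ≠ '0' then some 0 else none

theorem pvGoA_eq (l : List Char) : ∀ (i acc : Int),
    pvGoA l i acc =
      match pvLastNZ (l.takeWhile PySem.Chars.isdigit) with
      | some j => i + j
      | none => acc := by
  induction l with
  | nil => intro i acc; simp [pvGoA, pvLastNZ]
  | cons c rest ih =>
    intro i acc
    by_cases hd : PySem.Chars.isdigit c
    · simp only [pvGoA, hd, List.takeWhile_cons, not_true, if_false, ih]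
      cases h : pvLastNZ (rest.takeWhile PySem.Chars.isdigit) with
      | some j => simp [pvLastNZ, h]; ring
      | none =>
        by_cases hc : c = '0' <;> simp [pvLastNZ, h, hc]
    · simp [pvGoA, hd, pvLastNZ]

theorem pvBoundary_eq (l : List Char) :
    pvBoundary l = (l.takeWhile PySem.Chars.isdigit).length := by
  induction l with
  | nil => simp [pvBoundary]
  | cons c rest ih =>
    by_cases hd : PySem.Chars.isdigit c <;> simp [pvBoundary, hd, ih]

theorem pvLastNZ_append_singleton (xs : List Char) (c : Char) :
    pvLastNZ (xs ++ [c]) = if c ≠ '0' then some xs.length else pvLastNZ xs := by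
  induction xs with
  | nil => by_cases hc : c = '0' <;> simp [pvLastNZ, hc]
  | cons x rest ih =>
    simp only [List.cons_append, pvLastNZ, ih]
    by_cases hc : c = '0' <;> simp [hc]

theorem pvBack_eq (l : List Char) : ∀ (k : Nat), k ≤ l.length →
    pvBack l k = match pvLastNZ (l.take k) with
                 | some j => (j : Int)
                 | none => 0 := by
  intro k
  induction k with
  | zero => intro _; simp [pvBack, pvLastNZ]
  | succ k ih =>
    intro hk
    have hkl : k < l.length := Nat.lt_of_succ_le hk
    have htake : l.take (k + 1) = l.take k ++ [l.getD k ' '] := by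
      rw [List.getD_eq_getElem l ' ' hkl]
      exact List.take_succ_eq_append_getElem hkl
    rw [pvBack, htake, pvLastNZ_append_singleton, List.length_take_of_le (Nat.le_of_lt hkl)]
    split_ifs with hc
    · simp
    · simpa using ih (Nat.le_of_lt hkl)

-- ===== VERDICT (by name: the statement is the Claim_ definition above) =====
theorem find_last_non_zero_digit_spec : Claim_equal_find_last_non_zero_digit := by
  unfold Claim_equal_find_last_non_zero_digit
  intro digits _
  unfold Spec_find_last_non_zero_digit find_last_non_zero_digit find_last_non_zero_digit_alt
  have hpre := List.takeWhile_prefix (l := digits.toList) (p := PySem.Chars.isdigit)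
  rw [pvGoA_eq, pvBoundary_eq, pvBack_eq _ _ hpre.length_le,
    ← List.prefix_iff_eq_take.mp hpre]
  cases pvLastNZ (digits.toList.takeWhile PySem.Chars.isdigit) <;> simp
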